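-- pv_equiv track=rewrite | github.com/AhmedShafique313/SAM | CAMMI/existing_campaign/src/user_campaigns/app.py | _derive_campaign_status
-- ===== SOURCE A (Python) =====
-- def _derive_campaign_status(posts):
--     """Determine campaign status from posts (case-insensitive)"""
--
--     statuses = {
--         str(post.get("status", "")).strip().lower()
--         for post in posts
--     }
--
--     if statuses.issubset({"generated", "draft"}):
--         return "in-progress"
--
--     if statuses == {"scheduled"}:
--         return "active"
--
--     if statuses == {"published"}:
--         return "completed"
--
--     return None
-- ===== SOURCE B (Python) =====
-- def _derive_campaign_status(posts):
--     """Determine campaign status from posts (case-insensitive)"""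
--     all_in_generated_draft = True
--     all_scheduled = True
--     all_published = True
--     saw_any = False
--     for post in posts:
--         s = str(post.get("status", "")).strip().lower()
--         saw_any = True
--         if s not in ("generated", "draft"):
--             all_in_generated_draft = False
--         if s != "scheduled":
--             all_scheduled = False
--         if s != "published":
--             all_published = False
--     if all_in_generated_draft:
--         return "in-progress"
--     if saw_any and all_scheduled:
--         return "active"
--     if saw_any and all_published:
--         return "completed"
--     return None
-- ===== Notes on version B (the rewrite author's own statement) =====
-- stated objective: alternative
-- what changed: Replaces the set comprehension plus subset/equality checks with a single pass that maintains boolean accumulators (all-generated/draft, all-scheduled, all-published, saw-any) and decides the status from the flags.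
import Mathlib
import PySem

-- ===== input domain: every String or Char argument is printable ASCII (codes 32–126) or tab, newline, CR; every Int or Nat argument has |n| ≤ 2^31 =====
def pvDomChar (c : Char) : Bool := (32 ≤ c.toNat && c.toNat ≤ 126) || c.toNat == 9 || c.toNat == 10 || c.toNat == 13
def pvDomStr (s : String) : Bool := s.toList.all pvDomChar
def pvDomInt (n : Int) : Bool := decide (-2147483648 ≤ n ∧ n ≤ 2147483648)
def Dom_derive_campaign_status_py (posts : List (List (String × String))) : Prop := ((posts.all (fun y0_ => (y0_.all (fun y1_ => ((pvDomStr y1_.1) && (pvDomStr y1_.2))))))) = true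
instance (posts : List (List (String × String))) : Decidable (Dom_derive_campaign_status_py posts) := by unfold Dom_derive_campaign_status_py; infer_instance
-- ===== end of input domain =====

-- B replaces A's set comprehension + subset/equality checks by one pass with boolean flags (alternative decomposition, same cost).

-- ===== PORT A =====
-- str(post.get("status","")).strip().lower() — str() of a str is the identity
def pvNormA (post : List (String × String)) : String :=
  PySem.Str.lower (PySem.Str.strip (PySem.Dict.getD (PySem.Dict.mk post) "status" ""))

def derive_campaign_status_py (posts : List (List (String × String))) : Option String :=
  let statuses : PySem.Set String := PySem.Set.ofList (posts.map pvNormA)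
  if PySem.Set.issubset statuses (PySem.Set.ofList ["generated", "draft"]) then
    some "in-progress"
  else if PySem.Set.equal statuses (PySem.Set.ofList ["scheduled"]) then
    some "active"
  else if PySem.Set.equal statuses (PySem.Set.ofList ["published"]) then
    some "completed"
  else
    none

-- ===== PORT B =====
def pvNormB (post : List (String × String)) : String :=
  PySem.Str.lower (PySem.Str.strip (PySem.Dict.getD (PySem.Dict.mk post) "status" ""))

-- state = (all_in_generated_draft, all_scheduled, all_published, saw_any)
def pvLoopB (posts : List (List (String × String))) (st : Bool × Bool × Bool × Bool) :
    Bool × Bool × Bool × Bool :=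
  posts.foldl
    (fun st post =>
      let s := pvNormB post
      ((if !(s == "generated" || s == "draft") then false else st.1),
       (if s != "scheduled" then false else st.2.1),
       (if s != "published" then false else st.2.2.1),
       true))
    st

def derive_campaign_status_py_alt (posts : List (List (String × String))) : Option String :=
  let st := pvLoopB posts (true, true, true, false)
  if st.1 then some "in-progress"
  else if st.2.2.2 && st.2.1 then some "active"
  else if st.2.2.2 && st.2.2.1 then some "completed"
  else none

-- ===== PRECONDITION & SPEC =====
def Spec_derive_campaign_status_py (posts : List (List (String × String))) (out : Option String) : Prop := out = derive_campaign_status_py_alt posts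
instance (posts : List (List (String × String))) (out : Option String) : Decidable (Spec_derive_campaign_status_py posts out) := by unfold Spec_derive_campaign_status_py; infer_instance

-- ===== CLAIM (what is proved, stated in full; the proofs are below) =====
def Claim_equal_derive_campaign_status_py : Prop := ∀ (posts : List (List (String × String))), Dom_derive_campaign_status_py posts → Spec_derive_campaign_status_py posts (derive_campaign_status_py posts)

-- ===== LEMMAS AND PROOFS =====

theorem pvLoopB_spec (posts : List (List (String × String))) (a b c d : Bool) :
    pvLoopB posts (a, b, c, d) =
      (a && posts.all (fun p => pvNormB p == "generated" || pvNormB p == "draft"),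
       b && posts.all (fun p => pvNormB p == "scheduled"),
       c && posts.all (fun p => pvNormB p == "published"),
       d || !posts.isEmpty) := by
  induction posts generalizing a b c d with
  | nil => simp [pvLoopB]
  | cons p ps ih =>
    simp only [pvLoopB, List.foldl_cons] at *
    rw [ih]
    simp only [List.all_cons, List.isEmpty_cons]
    cases h1 : (pvNormB p == "generated" || pvNormB p == "draft") <;>
      cases h2 : (pvNormB p == "scheduled") <;>
      cases h3 : (pvNormB p == "published") <;>
      simp_all [bne]

theorem derive_campaign_status_py_spec : Claim_equal_derive_campaign_status_py := by
  intro posts _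
  show derive_campaign_status_py posts = derive_campaign_status_py_alt posts
  unfold derive_campaign_status_py derive_campaign_status_py_alt
  rw [pvLoopB_spec]
  simp only [Bool.true_and, Bool.false_or]
  have hnorm : pvNormA = pvNormB := rfl
  rw [hnorm]
  by_cases hgd : ∀ p ∈ posts, pvNormB p = "generated" ∨ pvNormB p = "draft"
  · have h1 : PySem.Set.issubset (PySem.Set.ofList (posts.map pvNormB))
        (PySem.Set.ofList ["generated", "draft"]) = true := by
      rw [PySem.Set.issubset_iff]
      intro x hx
      rw [PySem.Set.mem_ofList] at hx
      obtain ⟨p, hp, rfl⟩ := List.mem_map.mp hx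
      rcases hgd p hp with h | h <;> simp [PySem.Set.mem_ofList, h]
    have h2 : posts.all (fun p => pvNormB p == "generated" || pvNormB p == "draft") = true := by
      simp only [List.all_eq_true, Bool.or_eq_true, beq_iff_eq]
      exact hgd
    simp [h1, h2]
  · have h1 : ¬ (PySem.Set.issubset (PySem.Set.ofList (posts.map pvNormB))
        (PySem.Set.ofList ["generated", "draft"]) = true) := by
      rw [PySem.Set.issubset_iff]
      intro h
      apply hgd
      intro p hp
      have := h (pvNormB p) (by rw [PySem.Set.mem_ofList]; exact List.mem_map_of_mem hp)
      rw [PySem.Set.mem_ofList] at this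
      simpa using this
    have h2 : posts.all (fun p => pvNormB p == "generated" || pvNormB p == "draft") ≠ true := by
      intro h
      exact hgd (by simpa only [List.all_eq_true, Bool.or_eq_true, beq_iff_eq] using h)
    have hne : posts ≠ [] := by rintro rfl; exact hgd (by simp)
    have key : ∀ (v : String), PySem.Set.equal (PySem.Set.ofList (posts.map pvNormB))
        (PySem.Set.ofList [v]) = posts.all (fun p => pvNormB p == v) := by
      intro v
      by_cases hv : ∀ p ∈ posts, pvNormB p = v
      · have : PySem.Set.equal (PySem.Set.ofList (posts.map pvNormB))
            (PySem.Set.ofList [v]) = true := by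
          rw [PySem.Set.equal_iff]
          intro x
          simp only [PySem.Set.mem_ofList, List.mem_map, List.mem_singleton]
          constructor
          · rintro ⟨p, hp, rfl⟩; exact hv p hp
          · rintro rfl
            obtain ⟨p, hp⟩ := List.exists_mem_of_ne_nil posts hne
            exact ⟨p, hp, hv p hp⟩
        rw [this]
        symm
        simp only [List.all_eq_true, beq_iff_eq]
        exact hv
      · have heq : ¬ (PySem.Set.equal (PySem.Set.ofList (posts.map pvNormB))
            (PySem.Set.ofList [v]) = true) := by
          rw [PySem.Set.equal_iff]
          intro h
          apply hv
          intro p hp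
          have := (h (pvNormB p)).mp (by
            simp only [PySem.Set.mem_ofList]
            exact List.mem_map_of_mem hp)
          simpa [PySem.Set.mem_ofList] using this
        have hall : posts.all (fun p => pvNormB p == v) ≠ true := by
          intro h
          exact hv (by simpa only [List.all_eq_true, beq_iff_eq] using h)
        simp only [Bool.not_eq_true] at heq hall
        rw [heq, hall]
    simp only [Bool.not_eq_true] at h1 h2
    simp [h1, h2, key, hne]
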